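-- pv_equiv track=rewrite | github.com/ElleNajt/thought_anchors_and_unfaithful_CoT | influential_sentence_analysis.py | build_transplanted_prompt
-- ===== SOURCE A (Python) =====
-- def split_into_sentences(text):
--     """
--     Split text into sentences (simple version).
--
--     Returns:
--         list of sentences
--     """
--     sentences = []
--     current = ""
--
--     for char in text:
--         current += char
--         if char in '.!?':
--             sentences.append(current.strip())
--             current = ""
--
--     if current.strip():
--         sentences.append(current.strip())
--
--     return sentences
--
-- def build_transplanted_prompt(problem, num_sentences):
--     """
--     Build a transplanted prompt with CUMULATIVE hint sentences:
--     [no-hint question] + [hint sentences 0 to num_sentences-1]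
--
--     This transplants an increasing PREFIX of the hint-influenced CoT.
--
--     Args:
--         problem: Problem data dict with both 'reasoning_text' (hint) and 'base_reasoning_text' (non-hint)
--         num_sentences: How many hint sentences to transplant (0 to num_sentences-1)
--
--     Returns:
--         tuple: (transplanted_prompt, transplanted_sentences, num_sentences_transplanted)
--     """
--     # Get the hint-influenced reasoning
--     hint_reasoning = problem['reasoning_text']
--
--     # Split into sentences
--     hint_sentences = split_into_sentences(hint_reasoning)
--
--     # Build the transplanted prompt:
--     # [question] + [hint sentences 0 to num_sentences-1]
--     # Note: question already ends with "<think>\n"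
--     question = problem['question']
--     transplanted_text = question  # Already has <think>\n at the end
--
--     # Add cumulative hint sentences from 0 to num_sentences-1
--     transplanted_sents = []
--     for idx in range(num_sentences):
--         if idx < len(hint_sentences):
--             transplanted_text += hint_sentences[idx] + " "
--             transplanted_sents.append(hint_sentences[idx])
--
--     return transplanted_text, transplanted_sents, len(transplanted_sents)
-- ===== SOURCE B (Python) =====
-- def split_into_sentences(text):
--     """
--     Split text into sentences by cutting at each '.!?' position with slices
--     (index-based, no character accumulator).
--
--     Returns:
--         list of sentences
--     """
--     sentences = []
--     start = 0
--     for i, ch in enumerate(text):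
--         if ch in '.!?':
--             sentences.append(text[start:i + 1].strip())
--             start = i + 1
--     tail = text[start:].strip()
--     if tail:
--         sentences.append(tail)
--     return sentences
--
--
-- def build_transplanted_prompt(problem, num_sentences):
--     """
--     Build a transplanted prompt: question + an increasing prefix of hint sentences.
--
--     Returns:
--         tuple: (transplanted_prompt, transplanted_sentences, num_sentences_transplanted)
--     """
--     hint_sentences = split_into_sentences(problem['reasoning_text'])
--     transplanted_sents = hint_sentences[:max(num_sentences, 0)]
--     transplanted_text = problem['question'] + ''.join(s + ' ' for s in transplanted_sents)
--     return transplanted_text, transplanted_sents, len(transplanted_sents)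
-- ===== Notes on version B (the rewrite author's own statement) =====
-- stated objective: alternative
-- what changed: split_into_sentences cuts the text with index-based slices at each punctuation position instead of growing a character accumulator, and the prompt builder takes the sentence prefix with a slice and one join instead of a guarded index loop over range(num_sentences).
import Mathlib
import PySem

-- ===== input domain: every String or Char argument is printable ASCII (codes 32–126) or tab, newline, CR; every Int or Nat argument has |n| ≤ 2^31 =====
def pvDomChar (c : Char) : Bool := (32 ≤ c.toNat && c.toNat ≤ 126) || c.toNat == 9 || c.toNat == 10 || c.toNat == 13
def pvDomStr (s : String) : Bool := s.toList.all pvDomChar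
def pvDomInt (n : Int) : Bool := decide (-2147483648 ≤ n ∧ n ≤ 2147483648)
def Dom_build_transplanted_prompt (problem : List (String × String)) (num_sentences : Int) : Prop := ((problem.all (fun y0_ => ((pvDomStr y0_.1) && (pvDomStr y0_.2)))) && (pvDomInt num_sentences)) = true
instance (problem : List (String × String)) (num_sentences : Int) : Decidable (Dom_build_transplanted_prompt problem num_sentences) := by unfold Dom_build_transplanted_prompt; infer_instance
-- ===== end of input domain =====

-- B: index/slice-based sentence splitting and a slice+join prompt builder, replacing A's
-- character accumulator and guarded range loop (objective: alternative; same cost).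


-- `char in '.!?'` (exact membership test in that three-character string)
def pvIsPunct (c : Char) : Bool := c == '.' || c == '!' || c == '?'

-- ===== PORT A =====
-- A's loop body: current += char; if char in '.!?': append current.strip(); current = ""
def pvStepA (st : List String × List Char) (c : Char) : List String × List Char :=
  let cur := st.2 ++ [c]
  if pvIsPunct c then (st.1 ++ [String.ofList (PySem.Chars.strip cur)], []) else (st.1, cur)

def split_into_sentences (text : String) : List String :=
  let st := text.toList.foldl pvStepA ([], [])
  let tail := PySem.Chars.strip st.2
  if tail = [] then st.1 else st.1 ++ [String.ofList tail]

def build_transplanted_prompt (problem : List (String × String)) (num_sentences : Int) : String × List String × Int :=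
  let d := PySem.Dict.mk problem
  let hint_reasoning := (d.get? "reasoning_text").getD ""   -- KeyError excluded by Pre_
  let hint_sentences := split_into_sentences hint_reasoning
  let question := (d.get? "question").getD ""               -- KeyError excluded by Pre_
  let st := (PySem.List.pyRange 0 num_sentences 1).foldl (fun st idx =>
      if idx < (hint_sentences.length : Int) then
        (st.1 ++ (PySem.List.pyGetD hint_sentences idx "").toList ++ [' '],
         st.2 ++ [PySem.List.pyGetD hint_sentences idx ""])
      else st) (question.toList, ([] : List String))
  (String.ofList st.1, st.2, (st.2.length : Int))

-- ===== PORT B =====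
-- B's loop body over enumerate(text): if ch in '.!?': append text[start:i+1].strip(); start = i+1
def pvStepB (cs : List Char) (st : List String × Int) (ic : Int × Char) : List String × Int :=
  if pvIsPunct ic.2 then
    (st.1 ++ [String.ofList (PySem.Chars.strip (PySem.List.slice cs (some st.2) (some (ic.1 + 1))))],
     ic.1 + 1)
  else st

def split_into_sentences_B (text : String) : List String :=
  let cs := text.toList
  let st := (PySem.List.enumerate cs 0).foldl (pvStepB cs) ([], 0)
  let tail := PySem.Chars.strip (PySem.List.slice cs (some st.2) none)
  if tail = [] then st.1 else st.1 ++ [String.ofList tail]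

def build_transplanted_prompt_alt (problem : List (String × String)) (num_sentences : Int) : String × List String × Int :=
  let d := PySem.Dict.mk problem
  let hint_sentences := split_into_sentences_B ((d.get? "reasoning_text").getD "")  -- KeyError excluded by Pre_
  let transplanted_sents := PySem.List.slice hint_sentences none (some (max num_sentences 0))
  -- ''.join(s + ' ' for s in transplanted_sents): concatenation with the empty separator
  let transplanted_text := String.ofList (((d.get? "question").getD "").toList
      ++ (transplanted_sents.map (fun s => s.toList ++ [' '])).flatten)
  (transplanted_text, transplanted_sents, (transplanted_sents.length : Int))

-- ===== PRECONDITION & SPEC =====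
-- Pre_ excludes exactly the dicts missing the 'reasoning_text' or 'question' key, on which A raises KeyError.
def Pre_build_transplanted_prompt (problem : List (String × String)) (num_sentences : Int) : Prop :=
  ((PySem.Dict.mk problem).get? "reasoning_text").isSome = true ∧
  ((PySem.Dict.mk problem).get? "question").isSome = true
instance (problem : List (String × String)) (num_sentences : Int) : Decidable (Pre_build_transplanted_prompt problem num_sentences) := by unfold Pre_build_transplanted_prompt; infer_instance

def pvWitness_build_transplanted_prompt : (List (String × String)) × Int :=
  ([("reasoning_text", "Hi there. Ok!  then"), ("question", "Q? <think>\n")], 2)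

def Spec_build_transplanted_prompt (problem : List (String × String)) (num_sentences : Int) (out : String × List String × Int) : Prop := out = build_transplanted_prompt_alt problem num_sentences
instance (problem : List (String × String)) (num_sentences : Int) (out : String × List String × Int) : Decidable (Spec_build_transplanted_prompt problem num_sentences out) := by unfold Spec_build_transplanted_prompt; infer_instance

-- ===== CLAIM (what is proved, stated in full; the proofs are below) =====
def Claim_equal_build_transplanted_prompt : Prop := ∀ (problem : List (String × String)) (num_sentences : Int), Dom_build_transplanted_prompt problem num_sentences → Pre_build_transplanted_prompt problem num_sentences → Spec_build_transplanted_prompt problem num_sentences (build_transplanted_prompt problem num_sentences)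

-- ===== LEMMAS AND PROOFS =====

-- Invariant tying A's accumulator `current` to B's index `start`:
-- after consuming `done`, A's current is cs.drop start where cs = done ++ rest.
lemma pv_loopAB (rest : List Char) : ∀ (cs done : List Char) (sents : List String) (start : Nat),
    cs = done ++ rest → start ≤ done.length →
    (rest.foldl pvStepA (sents, done.drop start)).1
      = ((PySem.List.enumerate rest (done.length : Int)).foldl (pvStepB cs) (sents, (start : Int))).1
    ∧ ∃ s' : Nat,
        ((PySem.List.enumerate rest (done.length : Int)).foldl (pvStepB cs) (sents, (start : Int))).2 = (s' : Int)
        ∧ s' ≤ cs.length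
        ∧ (rest.foldl pvStepA (sents, done.drop start)).2 = cs.drop s' := by
  induction rest with
  | nil =>
    intro cs done sents start hcs h
    subst hcs
    exact ⟨rfl, start, rfl, by simp; omega, by simp⟩
  | cons c rest ih =>
    intro cs done sents start hcs h
    rw [PySem.List.enumerate_cons]
    simp only [List.foldl_cons]
    have hdropc : (done ++ [c]).drop start = done.drop start ++ [c] :=
      List.drop_append_of_le_length h
    have hcs' : cs = (done ++ [c]) ++ rest := by simp [hcs]
    have hclen : (((done ++ [c]).length : Nat) : Int) = (done.length : Int) + 1 := by simp
    by_cases hp : pvIsPunct c = true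
    · have hslice : PySem.List.slice cs (some (start : Int)) (some ((done.length : Int) + 1))
          = done.drop start ++ [c] := by
        rw [PySem.List.slice_toNat _ (by positivity) (by positivity)]
        have h1 : ((start : Int)).toNat = start := by omega
        have h2 : ((done.length : Int) + 1).toNat = done.length + 1 := by omega
        rw [h1, h2, hcs, List.drop_append_of_le_length h]
        have h3 : done.drop start ++ c :: rest = (done.drop start ++ [c]) ++ rest := by simp
        have h4 : done.length + 1 - start = (done.drop start ++ [c]).length := by simp; omega
        rw [h3, h4, List.take_left]
      have hA : pvStepA (sents, done.drop start) c
          = (sents ++ [String.ofList (PySem.Chars.strip (done.drop start ++ [c]))], []) := by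
        simp [pvStepA, hp]
      have hB : pvStepB cs (sents, (start : Int)) ((done.length : Int), c)
          = (sents ++ [String.ofList (PySem.Chars.strip (done.drop start ++ [c]))], (done.length : Int) + 1) := by
        simp only [pvStepB, hp, if_pos, hslice]
      rw [hA, hB]
      have H := ih cs (done ++ [c])
        (sents ++ [String.ofList (PySem.Chars.strip (done.drop start ++ [c]))])
        (done ++ [c]).length hcs' le_rfl
      rw [List.drop_length] at H
      rw [hclen] at H
      exact H
    · have hA : pvStepA (sents, done.drop start) c = (sents, done.drop start ++ [c]) := by
        simp [pvStepA, hp]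
      have hB : pvStepB cs (sents, (start : Int)) ((done.length : Int), c)
          = (sents, (start : Int)) := by
        simp [pvStepB, hp]
      rw [hA, hB]
      have H := ih cs (done ++ [c]) sents start hcs' (by simp; omega)
      rw [hdropc] at H
      rw [hclen] at H
      exact H

lemma pv_split_eq (text : String) : split_into_sentences text = split_into_sentences_B text := by
  simp only [split_into_sentences, split_into_sentences_B]
  obtain ⟨h1, s', h2, h3, h4⟩ :=
    pv_loopAB text.toList text.toList [] [] 0 (by simp) (by simp)
  simp only [List.length_nil, Nat.cast_zero, List.drop_nil] at h1 h2 h4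
  rw [h1, h2, h4, PySem.List.slice_from _ (by positivity)]
  have : ((s' : Int)).toNat = s' := by omega
  rw [this]

lemma pv_getD_take (l : List String) (j k : Nat) (h : j < k) :
    (l.take k).getD j "" = l.getD j "" := by
  simp [List.getD_eq_getElem?_getD, h]

-- A's guarded loop over range(num_sentences) collects exactly the prefix hints[:max(num,0)]
lemma pv_prefix_fold (hints : List String) (q : List Char) (num : Int) :
    ((PySem.List.pyRange 0 num 1).foldl (fun st idx =>
        if idx < (hints.length : Int) then
          (st.1 ++ (PySem.List.pyGetD hints idx "").toList ++ [' '],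
           st.2 ++ [PySem.List.pyGetD hints idx ""])
        else st) (q, ([] : List String)))
    = (q ++ ((PySem.List.slice hints none (some (max num 0))).map (fun s => s.toList ++ [' '])).flatten,
       PySem.List.slice hints none (some (max num 0))) := by
  rw [PySem.List.slice_to _ (by positivity)]
  by_cases hn : num ≤ 0
  · rw [PySem.List.pyRange_one_eq_nil hn]
    have : (max num 0).toNat = 0 := by omega
    simp [this]
  · have hn' : 0 < num := by omega
    have hmax : (max num 0).toNat = num.toNat := by omega
    set m : Int := min num (hints.length : Int) with hm
    have hm0 : (0 : Int) ≤ m := by omega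
    have hmnum : m ≤ num := by omega
    rw [PySem.List.pyRange_one_append 0 m num hm0 hmnum, List.foldl_append]
    -- the tail [m, num) of the range never passes the guard (and is empty when num ≤ len)
    rw [PySem.List.foldl_congr_mem _ _ (fun acc _ => acc) _ (by
      intro acc idx hmem
      rw [PySem.List.mem_pyRange_one] at hmem
      have : ¬ (idx < (hints.length : Int)) := by omega
      simp [this])]
    rw [PySem.List.foldl_ignore]
    -- on [0, m) the guard always holds and hints[idx] is an element of hints.take m.toNat
    have hlen : ((hints.take m.toNat).length : Int) = m := by simp; omega
    rw [show PySem.List.pyRange 0 m 1 = PySem.List.pyRange 0 ((hints.take m.toNat).length : Int) 1 by rw [hlen]]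
    rw [PySem.List.foldl_congr_mem _ _ (fun st idx =>
        (st.1 ++ (PySem.List.pyGetD (hints.take m.toNat) idx "").toList ++ [' '],
         st.2 ++ [PySem.List.pyGetD (hints.take m.toNat) idx ""])) _ (by
      intro acc idx hmem
      rw [PySem.List.mem_pyRange_one] at hmem
      obtain ⟨hi0, hilt⟩ := hmem
      rw [hlen] at hilt
      have hguard : idx < (hints.length : Int) := by omega
      have hget : PySem.List.pyGetD hints idx "" = PySem.List.pyGetD (hints.take m.toNat) idx "" := by
        rw [PySem.List.pyGetD_of_nonneg _ _ hi0, PySem.List.pyGetD_of_nonneg _ _ hi0,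
          pv_getD_take _ _ _ (by omega)]
      simp [hguard, hget])]
    rw [PySem.List.foldl_pyRange_zero_pyGetD' (hints.take m.toNat) ""
      (fun st s => (st.1 ++ s.toList ++ [' '], st.2 ++ [s])) (q, ([] : List String))]
    rw [PySem.List.foldl_prod_mk (fun (acc : List Char) (s : String) => acc ++ s.toList ++ [' ']) (fun (acc : List String) (s : String) => acc ++ [s])]
    have hfm : (hints.take m.toNat).foldl (fun acc s => acc ++ s.toList ++ [' ']) q
        = q ++ ((hints.take m.toNat).map (fun s => s.toList ++ [' '])).flatten := by
      rw [show (fun (acc : List Char) (s : String) => acc ++ s.toList ++ [' '])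
            = fun acc s => acc ++ (s.toList ++ [' ']) by funext acc s; simp]
      rw [PySem.List.foldl_append_eq_flatMap, List.flatMap_def]
    rw [hfm, PySem.List.foldl_append_singleton_eq_self, List.nil_append]
    have htake : hints.take num.toNat = hints.take m.toNat :=
      List.take_eq_take_iff.mpr (by omega)
    rw [hmax, htake]

lemma pv_build_eq (problem : List (String × String)) (num_sentences : Int) :
    build_transplanted_prompt problem num_sentences = build_transplanted_prompt_alt problem num_sentences := by
  simp only [build_transplanted_prompt, build_transplanted_prompt_alt, ← pv_split_eq]
  rw [pv_prefix_fold]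

-- ===== VERDICT (by name: the statement is the Claim_ definition above) =====
theorem build_transplanted_prompt_spec : Claim_equal_build_transplanted_prompt := by
  intro problem num_sentences _ _
  unfold Spec_build_transplanted_prompt
  exact pv_build_eq problem num_sentences
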